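-- pv_equiv track=rewrite | github.com/aditya-283/leetcode | problems/Medium/maximum-product-subarray/sol.py | splitAt
-- ===== SOURCE A (Python) =====
-- def splitAt(arr, x):
-- 	lists = []
-- 	cur = []
-- 	for elem in arr:
-- 		if elem != x:
-- 			cur.append(elem)
-- 		else:
-- 			lists.append(cur)
-- 			cur = []
-- 	lists.append(cur)
-- 	return lists
-- ===== SOURCE B (Python) =====
-- def splitAt(arr, x):
--     idxs = [i for i, e in enumerate(arr) if not (e != x)]
--     out = []
--     start = 0
--     for i in idxs:
--         out.append(arr[start:i])
--         start = i + 1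
--     out.append(arr[start:])
--     return out
-- ===== Notes on version B (the rewrite author's own statement) =====
-- stated objective: alternative
-- what changed: B first builds a table of delimiter indices with enumerate, then produces the output blocks as slices arr[start:i] in a second pass, instead of A's element-by-element accumulation into a growing current block.
import Mathlib
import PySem

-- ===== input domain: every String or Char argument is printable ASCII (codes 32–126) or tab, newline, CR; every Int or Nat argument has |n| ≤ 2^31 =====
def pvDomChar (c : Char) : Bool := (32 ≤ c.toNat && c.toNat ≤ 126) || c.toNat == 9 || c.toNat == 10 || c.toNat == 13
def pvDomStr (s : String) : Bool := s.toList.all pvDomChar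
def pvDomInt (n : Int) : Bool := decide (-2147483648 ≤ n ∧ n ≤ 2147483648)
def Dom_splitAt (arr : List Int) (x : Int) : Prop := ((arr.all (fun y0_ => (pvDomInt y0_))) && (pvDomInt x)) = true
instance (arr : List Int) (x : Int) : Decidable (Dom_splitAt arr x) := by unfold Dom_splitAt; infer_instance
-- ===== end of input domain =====

-- B replaces A's accumulate-per-element loop by an index table of the delimiter
-- positions plus a slicing pass (alternative decomposition, same cost).

-- ===== PORT A =====
def stepA (x : Int) (s : List (List Int) × List Int) (elem : Int) : List (List Int) × List Int :=
  if elem ≠ x then (s.1, s.2 ++ [elem]) else (s.1 ++ [s.2], [])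

def splitAt (arr : List Int) (x : Int) : List (List Int) :=
  let st := arr.foldl (stepA x) ([], [])
  st.1 ++ [st.2]

-- ===== PORT B =====
def stepB (arr : List Int) (s : List (List Int) × Int) (i : Int) : List (List Int) × Int :=
  (s.1 ++ [PySem.List.slice arr (some s.2) (some i)], i + 1)

def splitAt_alt (arr : List Int) (x : Int) : List (List Int) :=
  let idxs := ((PySem.List.enumerate arr 0).filter (fun p => !(p.2 != x))).map (·.1)
  let st := idxs.foldl (stepB arr) ([], 0)
  st.1 ++ [PySem.List.slice arr (some st.2) none]

-- ===== PRECONDITION & SPEC =====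
def Spec_splitAt (arr : List Int) (x : Int) (out : List (List Int)) : Prop := out = splitAt_alt arr x
instance (arr : List Int) (x : Int) (out : List (List Int)) : Decidable (Spec_splitAt arr x out) := by unfold Spec_splitAt; infer_instance

-- ===== CLAIM (what is proved, stated in full; the proofs are below) =====
def Claim_equal_splitAt : Prop := ∀ (arr : List Int) (x : Int), Dom_splitAt arr x → Spec_splitAt arr x (splitAt arr x)

-- ===== LEMMAS AND PROOFS =====

-- reference shape: the list of blocks, recursively
def splitRec (x : Int) : List Int → List (List Int)
  | [] => [[]]
  | e :: t => if e = x then [] :: splitRec x t else mapHead [e] (splitRec x t)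
where
  mapHead (p : List Int) : List (List Int) → List (List Int)
    | [] => [p]
    | h :: r => (p ++ h) :: r

theorem mapHead_mapHead (p q : List Int) (l : List (List Int)) :
    splitRec.mapHead p (splitRec.mapHead q l) = splitRec.mapHead (p ++ q) l := by
  cases l <;> simp [splitRec.mapHead]

theorem mapHead_nil (l : List (List Int)) (h : l ≠ []) : splitRec.mapHead [] l = l := by
  cases l with
  | nil => exact absurd rfl h
  | cons a r => simp [splitRec.mapHead]

theorem splitRec_ne_nil (x : Int) (t : List Int) : splitRec x t ≠ [] := by
  cases t with
  | nil => simp [splitRec]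
  | cons e t =>
    simp only [splitRec]
    split
    · simp
    · cases h : splitRec x t <;> simp [splitRec.mapHead]

theorem A_inv (x : Int) (t : List Int) : ∀ (lists : List (List Int)) (cur : List Int),
    (t.foldl (stepA x) (lists, cur)).1 ++ [(t.foldl (stepA x) (lists, cur)).2]
      = lists ++ splitRec.mapHead cur (splitRec x t) := by
  induction t with
  | nil => intro lists cur; simp [splitRec, splitRec.mapHead]
  | cons e t ih =>
    intro lists cur
    by_cases he : e = x
    · simp only [List.foldl_cons, stepA, he, ne_eq, not_true_eq_false, if_false]
      rw [ih, splitRec, if_pos rfl, mapHead_nil _ (splitRec_ne_nil x t)]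
      simp [splitRec.mapHead]
    · simp only [List.foldl_cons, stepA, ne_eq, he, not_false_eq_true, if_true]
      rw [ih, splitRec, if_neg he, mapHead_mapHead]

theorem B_inv (x : Int) (arr : List Int) (t : List Int) :
    ∀ (k s : Nat) (acc : List (List Int)), arr.drop k = t → s ≤ k →
    (letI st := ((((PySem.List.enumerate t (k : Int)).filter (fun p => !(p.2 != x))).map (·.1)).foldl
        (stepB arr) (acc, (s : Int)));
      st.1 ++ [PySem.List.slice arr (some st.2) none])
      = acc ++ splitRec.mapHead (PySem.List.slice arr (some (s : Int)) (some (k : Int))) (splitRec x t) := by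
  induction t with
  | nil =>
    intro k s acc hdrop hs
    have hlen : arr.length ≤ k := by
      have := congrArg List.length hdrop
      simp at this; omega
    simp [PySem.List.enumerate_nil, splitRec, splitRec.mapHead,
      PySem.List.slice_from_natCast, PySem.List.slice_natCast,
      List.take_of_length_le (by simp; omega : (arr.drop s).length ≤ k - s)]
  | cons e t ih =>
    intro k s acc hdrop hs
    have hk : k < arr.length := by
      by_contra h
      rw [List.drop_eq_nil_of_le (by omega)] at hdrop
      exact List.cons_ne_nil e t hdrop.symm
    have hget : arr[k]? = some e := by
      have h0 := congrArg (fun l => l[0]?) hdrop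
      simpa using h0
    have hdrop' : arr.drop (k + 1) = t := by
      have h1 := congrArg List.tail hdrop
      simpa [List.tail_drop] using h1
    rw [PySem.List.enumerate_cons]
    have hcast : ((k : Int) + 1) = ((k + 1 : Nat) : Int) := by push_cast; ring
    by_cases he : e = x
    · simp only [List.filter_cons, he, bne_self_eq_false, Bool.not_false, if_true, List.map_cons,
        List.foldl_cons, stepB]
      rw [hcast, ih (k + 1) (k + 1) _ hdrop' (le_refl _)]
      rw [splitRec, if_pos rfl]
      have hsl : PySem.List.slice arr (some ((k + 1 : Nat) : Int)) (some ((k + 1 : Nat) : Int)) = [] := by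
        rw [PySem.List.slice_natCast]; simp
      rw [hsl, mapHead_nil _ (splitRec_ne_nil x t)]
      simp [splitRec.mapHead, List.append_assoc]
    · have hcond : (!(e != x)) = false := by simp [he]
      simp only [List.filter_cons, hcond, Bool.false_eq_true, if_false]
      rw [hcast, ih (k + 1) s _ hdrop' (by omega)]
      rw [splitRec, if_neg he, mapHead_mapHead]
      congr 2
      rw [PySem.List.slice_natCast, PySem.List.slice_natCast]
      have h1 : k + 1 - s = (k - s) + 1 := by omega
      rw [h1, List.take_add_one]
      congr 1
      rw [List.getElem?_drop]
      have h2 : s + (k - s) = k := by omega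
      rw [h2, hget]
      rfl

-- ===== VERDICT (by name: the statement is the Claim_ definition above) =====
theorem splitAt_spec : Claim_equal_splitAt := by
  intro arr x _
  show splitAt arr x = splitAt_alt arr x
  unfold splitAt splitAt_alt
  have hA := A_inv x arr [] []
  have hB := B_inv x arr arr 0 0 [] (by simp) (le_refl 0)
  simp only [Int.natCast_zero] at hB
  simp only [] at hA hB ⊢
  rw [hA, hB]
  rw [mapHead_nil _ (splitRec_ne_nil x arr)]
  have h0 : PySem.List.slice arr (some (0 : Int)) (some (0 : Int)) = [] := by
    rw [show (0 : Int) = ((0 : Nat) : Int) from rfl, PySem.List.slice_natCast]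
    simp
  rw [h0, mapHead_nil _ (splitRec_ne_nil x arr)]
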